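-- pv_equiv track=rewrite | github.com/SeongjinLee00/Baekjoon | 프로그래머스/lv1/68935. 3진법 뒤집기/3진법 뒤집기.py | solution
-- ===== SOURCE A (Python) =====
-- def solution(n):
--     a=''
--
--     f=0
--     for i in range(1000,-1,-1):
--         if (3**i)<=n:
--             f=1
--         if f and (3**i)<=n:
--             a+=str(n//(3**i))
--             n-=(3**i)*int(a[-1])
--         elif f and (3**i)>n:
--             a+='0'
--     a=a
--     ret=0
--
--     for i in range(len(a)):
--         ret+=(3**i)*int(a[i])
--     return ret
-- ===== SOURCE B (Python) =====
-- def solution(n):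
--     ds = []
--     while n > 0:
--         n, r = divmod(n, 3)
--         ds.append(r)
--     ret = 0
--     for d in ds:
--         ret = ret * 3 + d
--     return ret
-- ===== Notes on version B (the rewrite author's own statement) =====
-- stated objective: faster
-- what changed: B replaces A's fixed scan over all powers 3^1000..3^0 (building a digit string and re-reading it char by char) with a divmod loop collecting base-3 digits least-significant-first and a single Horner fold over that list.
import Mathlib
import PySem

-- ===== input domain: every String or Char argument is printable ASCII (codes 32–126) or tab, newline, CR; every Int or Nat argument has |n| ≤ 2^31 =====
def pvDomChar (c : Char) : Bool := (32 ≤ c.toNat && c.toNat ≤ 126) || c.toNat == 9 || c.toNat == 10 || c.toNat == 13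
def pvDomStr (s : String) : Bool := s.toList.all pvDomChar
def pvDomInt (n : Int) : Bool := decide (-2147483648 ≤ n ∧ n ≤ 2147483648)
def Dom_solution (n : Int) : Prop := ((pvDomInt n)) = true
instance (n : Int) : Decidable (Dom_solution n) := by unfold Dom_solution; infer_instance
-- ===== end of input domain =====

-- B replaces A's fixed scan over the powers 3^1000..3^0 (which builds a digit string and re-reads it
-- character by character) with a divmod loop collecting base-3 digits plus a single Horner fold.
-- The Python string `a` is ported as List Char (PySem string functions are defined over List Char).

-- ===== PORT A =====
-- loop body of `for i in range(1000,-1,-1)`; state (a, n, f)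
def pvStep (s : List Char × Int × Int) (i : Int) : List Char × Int × Int :=
  let a := s.1
  let n := s.2.1
  let f := if (3:Int) ^ i.toNat ≤ n then 1 else s.2.2
  if f ≠ 0 ∧ (3:Int) ^ i.toNat ≤ n then
    let a' := a ++ PySem.Int.toChars (PySem.Int.floordiv n ((3:Int) ^ i.toNat))
    (a', n - (3:Int) ^ i.toNat * (((PySem.List.pyGet? a' (-1)).bind fun c => PySem.Int.ofChars? [c]).getD 0), f)
  else if f ≠ 0 ∧ (3:Int) ^ i.toNat > n then
    (a ++ ['0'], n, f)
  else
    (a, n, f)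

def solution (n : Int) : Int :=
  let s := (PySem.List.pyRange 1000 (-1) (-1)).foldl pvStep ([], n, 0)
  -- ret = 0; for i in range(len(a)): ret += (3**i)*int(a[i])
  (PySem.List.pyRange 0 (s.1.length : Int) 1).foldl
    (fun ret i =>
      ret + (3:Int) ^ i.toNat * (((PySem.List.pyGet? s.1 i).bind fun c => PySem.Int.ofChars? [c]).getD 0)) 0

-- ===== PORT B =====
-- while n > 0: n, r = divmod(n, 3); ds.append(r)   (the divisor is the literal 3, never zero)
def pvDigits (n : Int) (ds : List Int) : List Int :=
  if 0 < n then pvDigits (PySem.Int.floordiv n 3) (ds ++ [PySem.Int.mod n 3]) else ds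
termination_by n.toNat
decreasing_by rw [PySem.Int.floordiv_eq_ediv_of_pos (by norm_num)]; omega

def solution_alt (n : Int) : Int :=
  (pvDigits n []).foldl (fun ret d => ret * 3 + d) 0

-- ===== PRECONDITION & SPEC =====
def Spec_solution (n : Int) (out : Int) : Prop := out = solution_alt n
instance (n : Int) (out : Int) : Decidable (Spec_solution n out) := by unfold Spec_solution; infer_instance

-- ===== CLAIM (what is proved, stated in full; the proofs are below) =====
def Claim_equal_solution : Prop := ∀ (n : Int), Dom_solution n → Spec_solution n (solution n)

-- ===== LEMMAS AND PROOFS =====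

-- the character str(d) produces for a base-3 digit d
def pvCharOf (d : Int) : Char := if d = 1 then '1' else if d = 2 then '2' else '0'

-- base-3 digits of M, least significant first, as Ints
def pvDigsN (M : Nat) : List Int :=
  if M = 0 then [] else ((M % 3 : Nat) : Int) :: pvDigsN (M / 3)
termination_by M
decreasing_by exact Nat.div_lt_self (by omega) (by omega)

-- the k most significant base-3 digits of M (most significant first), assuming M < 3^k
def pvPadN (M k : Nat) : List Int := (List.range k).reverse.map fun j => ((M / 3 ^ j % 3 : Nat) : Int)

-- value of a digit list read least-significant-first
def pvVal : List Int → Int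
  | [] => 0
  | d :: t => d + 3 * pvVal t

theorem pvDigit_toChars {d : Int} (h0 : 0 ≤ d) (h3 : d < 3) : PySem.Int.toChars d = [pvCharOf d] := by
  interval_cases d <;> decide

theorem pvDigit_ofChars {d : Int} (h0 : 0 ≤ d) (h3 : d < 3) : PySem.Int.ofChars? [pvCharOf d] = some d := by
  interval_cases d <;> decide

theorem pvDigsN_mem : ∀ (M : Nat), ∀ d ∈ pvDigsN M, 0 ≤ d ∧ d < 3 := by
  intro M
  induction M using Nat.strong_induction_on with
  | _ M ih =>
    intro d h
    rw [pvDigsN] at h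
    split at h
    · simp at h
    · rcases List.mem_cons.mp h with h | h
      · subst h
        refine ⟨by positivity, ?_⟩
        exact_mod_cast Nat.mod_lt _ (by omega)
      · exact ih (M / 3) (Nat.div_lt_self (by omega) (by omega)) d h

theorem pvPadN_div (M k : Nat) : pvPadN M (k + 1) = pvPadN (M / 3) k ++ [((M % 3 : Nat) : Int)] := by
  unfold pvPadN
  rw [List.range_succ_eq_map]
  simp only [List.reverse_cons, List.map_append, List.map_map, List.map_reverse, List.map_cons,
    List.map_nil, pow_zero, Nat.div_one]
  congr 1
  · rw [← List.map_reverse, ← List.map_reverse]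
    apply List.map_congr_left
    intro j _
    simp only [Function.comp_apply]
    congr 1
    rw [pow_succ, Nat.div_div_eq_div_mul, mul_comm]

theorem pvPadN_exact : ∀ (k M : Nat), 3 ^ k ≤ M → M < 3 ^ (k + 1) →
    pvPadN M (k + 1) = (pvDigsN M).reverse := by
  intro k
  induction k with
  | zero =>
    intro M h1 h2
    interval_cases M <;> simp [pvPadN, pvDigsN]
  | succ k ih =>
    intro M h1 h2
    rw [pvPadN_div, pvDigsN]
    rw [if_neg (show ¬ M = 0 from by { have hp : 0 < 3 ^ (k+1) := pow_pos (by omega) _; omega })]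
    simp only [List.reverse_cons]
    rw [ih (M / 3) (Nat.le_div_iff_mul_le (by omega) |>.mpr (by rw [← pow_succ]; omega))
      ((Nat.div_lt_iff_lt_mul (by omega)).mpr (by rw [← pow_succ]; omega))]

theorem pvDigits_spec : ∀ (n : Int) (acc : List Int), pvDigits n acc = acc ++ pvDigsN n.toNat := by
  intro n acc
  fun_induction pvDigits n acc with
  | case1 n acc h ih =>
    rw [PySem.Int.floordiv_eq_ediv_of_pos (by norm_num)] at ih ⊢
    rw [ih, List.append_assoc, List.singleton_append]
    congr 1
    conv_rhs => rw [pvDigsN]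
    rw [if_neg (show ¬ n.toNat = 0 by omega)]
    congr 1
    · rw [PySem.Int.mod_eq_emod_of_pos (by norm_num)]; omega
    · congr 1; omega
  | case2 n acc h =>
    rw [pvDigsN, if_pos (by omega)]
    simp

theorem pvLoopA_nonpos : ∀ (L : List Int) (n : Int), n ≤ 0 →
    L.foldl pvStep ([], n, 0) = ([], n, 0) := by
  intro L
  induction L with
  | nil => intro n _; rfl
  | cons x t ih =>
    intro n h
    have h1 : ¬((3:Int) ^ x.toNat ≤ n) := by
      have : (0:Int) < 3 ^ x.toNat := pow_pos (by norm_num) _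
      omega
    simp only [List.foldl_cons]
    rw [show pvStep ([], n, 0) x = ([], n, 0) by simp [pvStep, h1]]
    exact ih n h

theorem pvStep_digit (a : List Char) (m f0 : Int) (k : Nat)
    (hle : (3:Int) ^ k ≤ m) (hlt : m < 3 ^ (k + 1)) :
    pvStep (a, m, f0) (k : Int)
      = (a ++ [pvCharOf (m / 3 ^ k)], m - 3 ^ k * (m / 3 ^ k), 1) := by
  have hp : (0:Int) < 3 ^ k := pow_pos (by norm_num) _
  have hd0 : 0 ≤ m / 3 ^ k := Int.ediv_nonneg (by omega) (by omega)
  have hd3 : m / 3 ^ k < 3 := by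
    rw [Int.ediv_lt_iff_lt_mul hp]
    calc m < 3 ^ (k+1) := hlt
    _ = 3 * 3 ^ k := by ring
  simp only [pvStep, Int.toNat_natCast, if_pos hle]
  rw [if_pos ⟨one_ne_zero, hle⟩]
  rw [PySem.Int.floordiv_eq_ediv_of_pos hp, pvDigit_toChars hd0 hd3,
    PySem.List.pyGet?_neg_one_append_singleton, Option.bind_some, pvDigit_ofChars hd0 hd3]
  rfl

theorem pvStep_zero (a : List Char) (m : Int) (k : Nat) (hlt : m < 3 ^ k) :
    pvStep (a, m, 1) (k : Int) = (a ++ ['0'], m, 1) := by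
  simp [pvStep, Int.toNat_natCast, not_le.mpr hlt]

theorem pvStep_noop (a : List Char) (m : Int) (i : Int) (h : ¬ ((3:Int) ^ i.toNat ≤ m)) :
    pvStep (a, m, 0) i = (a, m, 0) := by
  simp [pvStep, h]

theorem pvVal_append (xs : List Int) (d : Int) : pvVal (xs ++ [d]) = pvVal xs + 3 ^ xs.length * d := by
  induction xs with
  | nil => simp [pvVal]
  | cons x t ih => simp [pvVal, ih]; ring

theorem pvPadN_succ (M k : Nat) :
    pvPadN M (k + 1) = ((M / 3 ^ k % 3 : Nat) : Int) :: pvPadN (M % 3 ^ k) k := by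
  unfold pvPadN
  rw [List.range_succ, List.reverse_append]
  simp only [List.reverse_singleton, List.singleton_append, List.map_cons]
  congr 1
  apply List.map_congr_left
  intro j hj
  simp only [List.mem_reverse, List.mem_range] at hj
  congr 1
  conv_rhs => rw [show (3:Nat)^k = 3^j * 3^(k-j) by rw [← pow_add]; congr 1; omega]
  rw [Nat.mod_mul_right_div_self]
  exact (Nat.mod_mod_of_dvd _ (dvd_pow_self 3 (by omega : k - j ≠ 0))).symm

theorem pvLoopA_post : ∀ (k : Nat) (a : List Char) (M : Nat), M < 3 ^ (k + 1) →
    (PySem.List.pyRange (k : Int) (-1) (-1)).foldl pvStep (a, (M : Int), 1)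
      = (a ++ (pvPadN M (k + 1)).map pvCharOf, 0, 1) := by
  intro k
  induction k with
  | zero =>
    intro a M hM
    rw [PySem.List.pyRange_neg_one_cons (by norm_num), show ((0:ℕ):ℤ) - 1 = -1 by norm_num,
      PySem.List.pyRange_neg_one_eq_nil (by norm_num)]
    simp only [List.foldl_cons, List.foldl_nil]
    rcases Nat.eq_zero_or_pos M with h0 | h0
    · subst h0
      rw [pvStep_zero a ((0:ℕ):ℤ) 0 (by norm_num)]
      simp [pvPadN, pvCharOf]
    · rw [pvStep_digit a ((M:ℕ):ℤ) 1 0 (by exact_mod_cast h0) (by exact_mod_cast hM)]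
      simp only [pow_zero, Int.ediv_one, one_mul, sub_self]
      have hM3 : M < 3 := by simpa using hM
      interval_cases M <;> simp [pvPadN, pvCharOf]
  | succ k ih =>
    intro a M hM
    rw [PySem.List.pyRange_neg_one_cons (by push_cast; omega),
      show (((k+1:ℕ)):ℤ) - 1 = ((k:ℕ):ℤ) by push_cast; ring]
    simp only [List.foldl_cons]
    by_cases hle : 3 ^ (k+1) ≤ M
    · have hdlt : M / 3 ^ (k+1) < 3 := (Nat.div_lt_iff_lt_mul (by positivity)).mpr (by rw [← pow_succ']; omega)
      rw [pvStep_digit a ((M:ℕ):ℤ) 1 (k+1) (by exact_mod_cast hle) (by exact_mod_cast hM)]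
      rw [show ((M:ℕ):ℤ) - 3 ^ (k+1) * (((M:ℕ):ℤ) / 3 ^ (k+1)) = ((M % 3 ^ (k+1) : ℕ) : ℤ) by
        rw [← Int.emod_def]; push_cast; ring]
      rw [show ((M:ℕ):ℤ) / 3 ^ (k+1) = ((M / 3 ^ (k+1) : ℕ) : ℤ) by push_cast; ring]
      rw [ih _ (M % 3 ^ (k+1)) (Nat.mod_lt _ (by positivity))]
      rw [pvPadN_succ M (k+1), Nat.mod_eq_of_lt hdlt]
      simp
    · rw [pvStep_zero a ((M:ℕ):ℤ) (k+1) (by exact_mod_cast not_le.mp hle)]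
      rw [ih _ M (not_le.mp hle)]
      rw [pvPadN_succ M (k+1), Nat.div_eq_of_lt (not_le.mp hle), Nat.mod_eq_of_lt (not_le.mp hle)]
      simp [pvCharOf]

theorem pvLoopA_pre : ∀ (k : Nat) (M : Nat), 0 < M → M < 3 ^ (k + 1) →
    (PySem.List.pyRange (k : Int) (-1) (-1)).foldl pvStep ([], (M : Int), 0)
      = (((pvDigsN M).reverse).map pvCharOf, 0, 1) := by
  intro k
  induction k with
  | zero =>
    intro M h0 hM
    rw [PySem.List.pyRange_neg_one_cons (by norm_num), show ((0:ℕ):ℤ) - 1 = -1 by norm_num,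
      PySem.List.pyRange_neg_one_eq_nil (by norm_num)]
    simp only [List.foldl_cons, List.foldl_nil]
    rw [pvStep_digit [] ((M:ℕ):ℤ) 0 0 (by exact_mod_cast h0) (by exact_mod_cast hM)]
    rw [← pvPadN_exact 0 M h0 hM]
    simp only [pow_zero, Int.ediv_one, one_mul, sub_self]
    have hM3 : M < 3 := by simpa using hM
    interval_cases M <;> simp [pvPadN, pvCharOf]
  | succ k ih =>
    intro M h0 hM
    by_cases hle : 3 ^ (k+1) ≤ M
    · rw [PySem.List.pyRange_neg_one_cons (by push_cast; omega),
        show (((k+1:ℕ)):ℤ) - 1 = ((k:ℕ):ℤ) by push_cast; ring]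
      simp only [List.foldl_cons]
      have hdlt : M / 3 ^ (k+1) < 3 := (Nat.div_lt_iff_lt_mul (by positivity)).mpr (by rw [← pow_succ']; omega)
      rw [pvStep_digit [] ((M:ℕ):ℤ) 0 (k+1) (by exact_mod_cast hle) (by exact_mod_cast hM)]
      rw [show ((M:ℕ):ℤ) - 3 ^ (k+1) * (((M:ℕ):ℤ) / 3 ^ (k+1)) = ((M % 3 ^ (k+1) : ℕ) : ℤ) by
        rw [← Int.emod_def]; push_cast; ring]
      rw [show ((M:ℕ):ℤ) / 3 ^ (k+1) = ((M / 3 ^ (k+1) : ℕ) : ℤ) by push_cast; ring]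
      rw [pvLoopA_post k _ (M % 3 ^ (k+1)) (Nat.mod_lt _ (by positivity))]
      rw [← pvPadN_exact (k+1) M hle hM]
      rw [pvPadN_succ M (k+1), Nat.mod_eq_of_lt hdlt]
      simp
    · rw [PySem.List.pyRange_neg_one_cons (by push_cast; omega),
        show (((k+1:ℕ)):ℤ) - 1 = ((k:ℕ):ℤ) by push_cast; ring]
      simp only [List.foldl_cons]
      rw [pvStep_noop [] ((M:ℕ):ℤ) (((k+1:ℕ)):ℤ) (by
        rw [Int.toNat_natCast]
        exact_mod_cast not_le.mpr (not_le.mp hle) )]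
      exact ih M h0 (not_le.mp hle)

theorem pvHorner (xs : List Int) : ∀ acc : Int,
    xs.foldl (fun ret d => ret * 3 + d) acc = acc * 3 ^ xs.length + pvVal xs.reverse := by
  induction xs with
  | nil => simp [pvVal]
  | cons x t ih =>
    intro acc
    simp only [List.foldl_cons, ih, List.reverse_cons, pvVal_append, List.length_cons,
      List.length_reverse]
    ring

theorem pvLoopA_sum_aux (L : List Int) (h : ∀ d ∈ L, 0 ≤ d ∧ d < 3) :
    ∀ k, k ≤ L.length →
    (PySem.List.pyRange 0 (k : Int) 1).foldl
      (fun ret i =>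
        ret + (3:Int) ^ i.toNat * (((PySem.List.pyGet? (L.map pvCharOf) i).bind fun c => PySem.Int.ofChars? [c]).getD 0)) 0
      = pvVal (L.take k) := by
  intro k
  induction k with
  | zero => simp [PySem.List.pyRange_one_eq_nil, pvVal]
  | succ k ih =>
    intro hk
    have hk' : k < L.length := by omega
    rw [show (((k+1:ℕ)):ℤ) = ((k:ℕ):ℤ) + 1 by push_cast; ring,
      PySem.List.pyRange_one_succ_right (by positivity)]
    rw [List.foldl_append, ih (by omega)]
    simp only [List.foldl_cons, List.foldl_nil]
    rw [PySem.List.pyGet?_natCast, List.getElem?_map, List.getElem?_eq_getElem hk']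
    simp only [Option.map_some, Option.bind_some, Int.toNat_natCast]
    rw [pvDigit_ofChars (h _ (List.getElem_mem hk')).1 (h _ (List.getElem_mem hk')).2]
    rw [List.take_add_one, List.getElem?_eq_getElem hk']
    simp only [Option.toList_some, pvVal_append, List.length_take,
      Nat.min_eq_left (le_of_lt hk'), Option.getD_some]

theorem pvLoopA_sum (L : List Int) (h : ∀ d ∈ L, 0 ≤ d ∧ d < 3) :
    (PySem.List.pyRange 0 (((L.map pvCharOf).length : ℕ) : Int) 1).foldl
      (fun ret i =>
        ret + (3:Int) ^ i.toNat * (((PySem.List.pyGet? (L.map pvCharOf) i).bind fun c => PySem.Int.ofChars? [c]).getD 0)) 0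
      = pvVal L := by
  rw [List.length_map]
  rw [pvLoopA_sum_aux L h L.length le_rfl, List.take_length]

theorem pvSolution_eq : ∀ (n : Int), -2147483648 ≤ n → n ≤ 2147483648 → solution n = solution_alt n := by
  intro n h1 h2
  by_cases hn : 0 < n
  · have hM : ((n.toNat : ℕ) : ℤ) = n := Int.toNat_of_nonneg (by omega)
    have hMb : n.toNat < 3 ^ (1000 + 1) := by
      have hA : n.toNat ≤ 2147483648 := by omega
      have hB : (2147483648:ℕ) < 3 ^ 21 := by norm_num
      have hC : (3:ℕ) ^ 21 ≤ 3 ^ (1000 + 1) := Nat.pow_le_pow_right (by norm_num) (by norm_num)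
      omega
    simp only [solution, solution_alt]
    rw [pvDigits_spec, List.nil_append, pvHorner]
    rw [show (1000:Int) = ((1000:ℕ):ℤ) by norm_num, ← hM,
      pvLoopA_pre 1000 n.toNat (by omega) hMb]
    rw [pvLoopA_sum ((pvDigsN n.toNat).reverse)
      (fun d hd => pvDigsN_mem n.toNat d (List.mem_reverse.mp hd))]
    simp
    congr 3
    omega
  · simp only [solution, solution_alt]
    rw [pvLoopA_nonpos _ n (by omega), pvDigits_spec,
      show n.toNat = 0 by omega, pvDigsN, if_pos rfl]
    simp [PySem.List.pyRange_one_eq_nil]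

-- ===== VERDICT (by name: the statement is the Claim_ definition above) =====
theorem solution_spec : Claim_equal_solution := by
  intro n hdom
  unfold Spec_solution
  unfold Dom_solution pvDomInt at hdom
  have hb := of_decide_eq_true hdom
  exact pvSolution_eq n hb.1 hb.2
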